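-- pv_equiv track=rewrite | github.com/JamesHeilingerWebDevelopment/advent-of-code | 2023/12/python/code.py | create_test_strings
-- ===== SOURCE A (Python) =====
-- def lexico_permute_strings(s):
--     """
--     Generate all permutations in lexicographic order of string `s`.
--
--     This algorithm, due to Narayana Pandita, is from
--     https://en.wikipedia.org/wiki/Permutation#Generation_in_lexicographic_order
--
--     To produce the next permutation in lexicographic order of sequence `a`:
--
--     1. Find the largest index j such that a[j] < a[j + 1]. If no such index exists,
--     the permutation is the last permutation.
--     2. Find the largest index k greater than j such that a[j] < a[k].
--     3. Swap the value of a[j] with that of a[k].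
--     4. Reverse the sequence from a[j + 1] up to and including the final element a[n].
--
--     Found at https://stackoverflow.com/a/43014919
--     """
--     a = sorted(s)
--     n = len(a) - 1
--     while True:
--         yield "".join(a)
--
--         # 1. Find the largest index j such that a[j] < a[j + 1]
--         for j in range(n-1, -1, -1):
--             if a[j] < a[j + 1]:
--                 break
--         else:
--             return
--
--         # 2. Find the largest index k greater than j such that a[j] < a[k]
--         v = a[j]
--         for k in range(n, j, -1):
--             if v < a[k]:
--                 break
--
--         # 3. Swap the value of a[j] with that of a[k]
--         a[j], a[k] = a[k], a[j]
--
--         # Reverse the tail of the sequence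
--         a[j+1:] = a[j+1:][::-1]
--
-- def create_test_strings(record: str, backup: str) -> list[str]:
--     test_strings = []
--
--     total_broken = sum([int(x) for x in backup.split(",")]) - record.count("#")
--     temp_string = "#" * total_broken + "." * (record.count("?") - total_broken)
--     idxs = [i for i, j in enumerate(record) if j == "?"]
--     perms = lexico_permute_strings(temp_string)
--
--     temp_list = [x for x in record]
--     for char in perms:
--         for y, z in zip(idxs, char):
--             temp_list[y] = z
--         test_strings.append("".join(temp_list))
--     return test_strings
-- ===== SOURCE B (Python) =====
-- def create_test_strings(record: str, backup: str) -> list[str]: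
--     total_broken = sum(int(x) for x in backup.split(",")) - record.count("#")
--     num_q = record.count("?")
--     h = max(total_broken, 0)
--     d = max(num_q - total_broken, 0)
--
--     def gen(h, d):
--         # all strings made of h '#'s and d '.'s, in lexicographic order ('#' < '.')
--         if h == 0:
--             return ["." * d]
--         if d == 0:
--             return ["#" * h]
--         return ["#" + s for s in gen(h - 1, d)] + ["." + s for s in gen(h, d - 1)]
--
--     idxs = [i for i, c in enumerate(record) if c == "?"]
--     temp_list = [x for x in record]
--     test_strings = []
--     for char in gen(h, d):
--         for y, z in zip(idxs, char):
--             temp_list[y] = z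
--         test_strings.append("".join(temp_list))
--     return test_strings
-- ===== Notes on version B (the rewrite author's own statement) =====
-- stated objective: alternative
-- what changed: replaces the sort + Narayana-Pandita next-permutation loop (repeated backward pivot scans, swap, tail reversal) by a direct recursive enumeration of all strings with h '#'s and d '.'s in lexicographic order
import Mathlib
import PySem

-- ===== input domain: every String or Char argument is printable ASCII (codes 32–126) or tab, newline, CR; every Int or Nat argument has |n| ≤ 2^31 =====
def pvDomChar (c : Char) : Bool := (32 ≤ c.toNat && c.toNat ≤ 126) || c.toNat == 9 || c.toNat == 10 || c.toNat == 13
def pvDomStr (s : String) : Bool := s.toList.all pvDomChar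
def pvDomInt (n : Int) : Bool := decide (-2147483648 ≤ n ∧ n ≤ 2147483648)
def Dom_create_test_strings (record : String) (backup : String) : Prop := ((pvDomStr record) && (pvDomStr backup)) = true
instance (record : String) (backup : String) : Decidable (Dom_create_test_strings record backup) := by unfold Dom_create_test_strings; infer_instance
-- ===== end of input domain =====

-- B replaces A's sort + Narayana-Pandita next-permutation loop by a direct recursive
-- enumeration of the same strings in the same lexicographic order (alternative algorithm).

-- ===== PORT A =====

-- port of `if a[j] < a[j + 1]` (both indices are in range whenever the loops below query them)
def pvAsc (a : List Char) (j : Nat) : Bool := decide (a.getD j ' ' < a.getD (j + 1) ' ')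

-- port of step 1: `for j in range(n-1, -1, -1): if a[j] < a[j+1]: break / else: return`
def pvFindJ (a : List Char) : Nat → Option Nat
  | 0 => if pvAsc a 0 then some 0 else none
  | j + 1 => if pvAsc a (j + 1) then some (j + 1) else pvFindJ a j

-- port of step 2: `for k in range(n, j, -1): if v < a[k]: break` (falls through with k = j+1)
def pvFindK (a : List Char) (v : Char) (j : Nat) : Nat → Nat
  | 0 => 0
  | k + 1 =>
    if decide (v < a.getD (k + 1) ' ') then k + 1
    else if k + 1 ≤ j + 1 then k + 1
    else pvFindK a v j k

-- one pass of the `while True` body after the yield (steps 1-4); none = the generator returns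
def pvStep (a : List Char) : Option (List Char) :=
  if 2 ≤ a.length then
    match pvFindJ a (a.length - 2) with
    | none => none
    | some j =>
      let v := a.getD j ' '
      let k := pvFindK a v j (a.length - 1)
      let a' := (a.set j (a.getD k ' ')).set k v
      some (a'.take (j + 1) ++ (a'.drop (j + 1)).reverse)
  else none

-- the generator `lexico_permute_strings`: yield, step, repeat.  The fuel 2^len used below
-- bounds the number of yields and is proved never to run out (pvPerms_eq/binStrings_len).
def pvPerms : Nat → List Char → List (List Char)
  | 0, a => [a]
  | fuel + 1, a =>
    a :: (match pvStep a with
          | none => []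
          | some b => pvPerms fuel b)

def create_test_strings (record : String) (backup : String) : List String :=
  let parts := (PySem.Str.split? backup ",").getD []   -- sep "," ≠ "", so split? is some
  -- `int(x)` raises ValueError on unparsable parts: excluded by Pre_, `.getD 0` unreachable there
  let total_broken : Int :=
    (parts.map (fun x => (PySem.Int.ofStr? x).getD 0)).sum - (PySem.Str.count record "#" : Int)
  let temp_string : List Char :=
    PySem.List.pyRepeat ['#'] total_broken
      ++ PySem.List.pyRepeat ['.'] ((PySem.Str.count record "?" : Int) - total_broken)
  let idxs : List Int :=
    ((PySem.List.enumerate record.toList).filter (fun p => p.2 == '?')).map (fun p => p.1)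
  let a := PySem.List.sorted temp_string (fun c => c)
  let perms := pvPerms (2 ^ a.length) a
  (perms.foldl
      (fun (st : List Char × List String) char =>
        let tl := (idxs.zip char).foldl (fun t yz => PySem.List.pySetD t yz.1 yz.2) st.1
        (tl, st.2 ++ [String.ofList tl]))
      (record.toList, [])).2

-- ===== PORT B =====

-- `gen(h, d)`: all strings made of h '#'s and d '.'s, in lexicographic order ('#' < '.')
def binStrings : Nat → Nat → List (List Char)
  | 0, d => [List.replicate d '.']
  | h + 1, 0 => [List.replicate (h + 1) '#']
  | h + 1, d + 1 =>
    (binStrings h (d + 1)).map (fun s => '#' :: s)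
      ++ (binStrings (h + 1) d).map (fun s => '.' :: s)
  termination_by h d => (h, d)

def create_test_strings_alt (record : String) (backup : String) : List String :=
  let parts := (PySem.Str.split? backup ",").getD []
  let total_broken : Int :=
    (parts.map (fun x => (PySem.Int.ofStr? x).getD 0)).sum - (PySem.Str.count record "#" : Int)
  let num_q : Int := (PySem.Str.count record "?" : Int)
  let h := (max total_broken 0).toNat            -- h = max(total_broken, 0)
  let d := (max (num_q - total_broken) 0).toNat  -- d = max(num_q - total_broken, 0)
  let idxs : List Int :=
    ((PySem.List.enumerate record.toList).filter (fun p => p.2 == '?')).map (fun p => p.1)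
  ((binStrings h d).foldl
      (fun (st : List Char × List String) char =>
        let tl := (idxs.zip char).foldl (fun t yz => PySem.List.pySetD t yz.1 yz.2) st.1
        (tl, st.2 ++ [String.ofList tl]))
      (record.toList, [])).2

-- ===== PRECONDITION & SPEC =====
-- Pre_ excludes exactly the inputs on which A raises: `int(x)` on some piece of
-- backup.split(",") raises ValueError (e.g. backup = "" or backup = "1,a").
def Pre_create_test_strings (record : String) (backup : String) : Prop :=
  ∀ x ∈ (PySem.Str.split? backup ",").getD [], (PySem.Int.ofStr? x).isSome = true
instance (record : String) (backup : String) : Decidable (Pre_create_test_strings record backup) := by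
  unfold Pre_create_test_strings; infer_instance

def pvWitness_create_test_strings : String × String := ("?#?", "2,1")

def Spec_create_test_strings (record : String) (backup : String) (out : List String) : Prop :=
  out = create_test_strings_alt record backup
instance (record : String) (backup : String) (out : List String) :
    Decidable (Spec_create_test_strings record backup out) := by
  unfold Spec_create_test_strings; infer_instance

-- ===== CLAIM (what is proved, stated in full; the proofs are below) =====
def Claim_equal_create_test_strings : Prop :=
  ∀ (record : String) (backup : String), Dom_create_test_strings record backup →
    Pre_create_test_strings record backup →
    Spec_create_test_strings record backup (create_test_strings record backup)

-- ===== LEMMAS AND PROOFS =====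

-- successor relation between consecutive multiset permutations:
-- x = u ++ "#" ++ "."^(e+1) ++ "#"^f  steps to  y = u ++ "." ++ "#"^(f+1) ++ "."^e
def pvRel (x y : List Char) : Prop :=
  ∃ u e f, x = u ++ '#' :: (List.replicate (e + 1) '.' ++ List.replicate f '#')
         ∧ y = u ++ '.' :: (List.replicate (f + 1) '#' ++ List.replicate e '.')

lemma pvRel_cons (c : Char) {x y : List Char} (h : pvRel x y) : pvRel (c :: x) (c :: y) := by
  obtain ⟨u, e, f, hx, hy⟩ := h
  exact ⟨c :: u, e, f, by simp [hx], by simp [hy]⟩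

lemma pvGetD_reps (c1 c2 : Char) (p q n : Nat) (dflt : Char) :
    (List.replicate p c1 ++ List.replicate q c2).getD n dflt =
      if n < p then c1 else if n < p + q then c2 else dflt := by
  by_cases h1 : n < p
  · rw [List.getD_eq_getElem?_getD, List.getElem?_append_left (by simpa using h1),
      List.getElem?_replicate, if_pos h1, if_pos h1]
    rfl
  · rw [List.getD_eq_getElem?_getD, List.getElem?_append_right (by simpa using h1),
      List.length_replicate, List.getElem?_replicate]
    by_cases h2 : n < p + q
    · rw [if_pos (by omega), if_neg h1, if_pos h2]; rfl
    · rw [if_neg (by omega), if_neg h1, if_neg h2]; rfl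

lemma pvGetD_mid (u z : List Char) (i : Nat) (d : Char) :
    (u ++ z).getD (u.length + i) d = z.getD i d := by
  rw [List.getD_eq_getElem?_getD, List.getElem?_append_right (by omega),
    Nat.add_sub_cancel_left, ← List.getD_eq_getElem?_getD]

-- value of x = u ++ '#' ++ '.'^(e+1) ++ '#'^f at absolute index u.length + i
lemma pvXval (u : List Char) (e f i : Nat) :
    (u ++ '#' :: (List.replicate (e + 1) '.' ++ List.replicate f '#')).getD (u.length + i) ' ' =
      if i = 0 then '#' else if i ≤ e + 1 then '.' else if i ≤ e + 1 + f then '#' else ' ' := by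
  rw [pvGetD_mid]
  cases i with
  | zero => simp
  | succ n =>
    rw [List.getD_cons_succ, pvGetD_reps]
    split_ifs <;> first | rfl | contradiction

lemma pvFindJ_found (a : List Char) (m : Nat) (hm : pvAsc a m = true) :
    ∀ t, (∀ i, m < i → i ≤ m + t → pvAsc a i = false) → pvFindJ a (m + t) = some m := by
  intro t
  induction t with
  | zero =>
    intro _
    cases m with
    | zero => simp [pvFindJ, hm]
    | succ m' => simp [pvFindJ, hm]
  | succ t ih =>
    intro hno
    have h1 : pvAsc a (m + (t + 1)) = false := hno _ (by omega) (by omega)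
    have e1 : m + (t + 1) = (m + t) + 1 := by omega
    rw [e1] at h1 ⊢
    simp only [pvFindJ, h1, Bool.false_eq_true, if_false]
    exact ih (fun i hi1 hi2 => hno i hi1 (by omega))

lemma pvFindJ_none (a : List Char) :
    ∀ t, (∀ i, i ≤ t → pvAsc a i = false) → pvFindJ a t = none := by
  intro t
  induction t with
  | zero => intro h; simp [pvFindJ, h 0 (by omega)]
  | succ t ih =>
    intro h
    simp only [pvFindJ, h (t + 1) (by omega), Bool.false_eq_true, if_false]
    exact ih (fun i hi => h i (by omega))

lemma pvFindK_found (a : List Char) (v : Char) (j k0 : Nat) (hj : j + 1 ≤ k0)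
    (hk : decide (v < a.getD k0 ' ') = true) :
    ∀ t, (∀ i, k0 < i → i ≤ k0 + t → decide (v < a.getD i ' ') = false) →
      pvFindK a v j (k0 + t) = k0 := by
  intro t
  induction t with
  | zero =>
    intro _
    cases k0 with
    | zero => omega
    | succ k' => simp only [pvFindK, hk, if_true]
  | succ t ih =>
    intro hno
    have h1 : decide (v < a.getD (k0 + (t + 1)) ' ') = false := hno _ (by omega) (by omega)
    have e1 : k0 + (t + 1) = (k0 + t) + 1 := by omega
    rw [e1] at h1 ⊢
    simp only [pvFindK, h1, Bool.false_eq_true, if_false]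
    rw [if_neg (by omega)]
    exact ih (fun i hi1 hi2 => hno i hi1 (by omega))

lemma pvSet_mid (u z : List Char) (i : Nat) (v : Char) :
    (u ++ z).set (u.length + i) v = u ++ z.set i v := by
  induction u with
  | nil => simp
  | cons a u ih =>
    have e1 : (a :: u).length + i = (u.length + i) + 1 := by simp; omega
    rw [List.cons_append, e1, List.set_cons_succ, ih, List.cons_append]

lemma pvSet_rep_last (c c' : Char) (e : Nat) :
    (List.replicate (e + 1) c).set e c' = List.replicate e c ++ [c'] := by
  induction e with
  | zero => rfl
  | succ e ih =>
    rw [List.replicate_succ, List.set_cons_succ, ih, List.replicate_succ, List.cons_append]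

lemma pvStep_rel {x y : List Char} (h : pvRel x y) : pvStep x = some y := by
  obtain ⟨u, e, f, hx, hy⟩ := h
  have hlen : x.length = u.length + e + f + 2 := by
    rw [hx]; simp [List.length_append, List.length_replicate]; omega
  have hval : ∀ i, x.getD (u.length + i) ' ' =
      (if i = 0 then '#' else if i ≤ e + 1 then '.' else if i ≤ e + 1 + f then '#' else ' ') := by
    intro i; rw [hx]; exact pvXval u e f i
  have h0 : x.getD u.length ' ' = '#' := by simpa using hval 0
  have h1 : x.getD (u.length + 1) ' ' = '.' := by simpa using hval 1
  have hasc : pvAsc x u.length = true := by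
    unfold pvAsc; rw [h0, h1]; decide
  have hnoasc : ∀ i, u.length < i → i ≤ u.length + (e + f) → pvAsc x i = false := by
    intro i hi1 hi2
    unfold pvAsc
    have e2 : i = u.length + (i - u.length) := by omega
    have e3 : i + 1 = u.length + ((i - u.length) + 1) := by omega
    have hv1 := hval (i - u.length); rw [← e2] at hv1
    have hv2 := hval (i - u.length + 1); rw [← e3] at hv2
    rw [hv1, hv2]
    split_ifs <;> first | decide | omega
  have hfj : pvFindJ x (x.length - 2) = some u.length := by
    have e4 : x.length - 2 = u.length + (e + f) := by omega
    rw [e4]; exact pvFindJ_found x u.length hasc (e + f) hnoasc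
  have hmid : x.getD (u.length + (e + 1)) ' ' = '.' := by
    rw [hval]; rw [if_neg (by omega), if_pos (by omega)]
  have hfk : pvFindK x (x.getD u.length ' ') u.length (x.length - 1) = u.length + (e + 1) := by
    rw [h0]
    have e5 : x.length - 1 = (u.length + (e + 1)) + f := by omega
    rw [e5]
    apply pvFindK_found x '#' u.length (u.length + (e + 1)) (by omega)
      (by rw [hmid]; decide)
    intro i hi1 hi2
    have e6 : i = u.length + (i - u.length) := by omega
    have hvi := hval (i - u.length); rw [← e6] at hvi
    rw [hvi, if_neg (by omega), if_neg (by omega), if_pos (by omega)]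
    decide
  have hset : (x.set u.length (x.getD (u.length + (e + 1)) ' ')).set (u.length + (e + 1))
      (x.getD u.length ' ')
      = u ++ '.' :: ((List.replicate e '.' ++ ['#']) ++ List.replicate f '#') := by
    have hset1 : (u ++ '#' :: (List.replicate (e + 1) '.' ++ List.replicate f '#')).set u.length '.'
        = u ++ '.' :: (List.replicate (e + 1) '.' ++ List.replicate f '#') := by
      simp
    rw [hmid, h0, hx, hset1, pvSet_mid, List.set_cons_succ,
      List.set_append_left _ _ (by simp), pvSet_rep_last]
  unfold pvStep
  rw [if_pos (by omega), hfj]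
  simp only [hfk, hset]
  have e8 : u ++ '.' :: ((List.replicate e '.' ++ ['#']) ++ List.replicate f '#')
      = (u ++ ['.']) ++ ((List.replicate e '.' ++ ['#']) ++ List.replicate f '#') := by simp
  have e9 : u.length + 1 = (u ++ ['.']).length + 0 := by simp
  rw [e8, e9, List.take_length_add_append, List.drop_length_add_append, hy]
  simp [List.reverse_append, List.reverse_replicate, List.replicate_succ', List.append_assoc]

lemma pvStep_last (e f : Nat) :
    pvStep (List.replicate e '.' ++ List.replicate f '#') = none := by
  by_cases hL : 2 ≤ (List.replicate e '.' ++ List.replicate f '#').length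
  · unfold pvStep
    rw [if_pos hL]
    have hlen : (List.replicate e '.' ++ List.replicate f '#').length = e + f := by simp
    have hfj : pvFindJ (List.replicate e '.' ++ List.replicate f '#')
        ((List.replicate e '.' ++ List.replicate f '#').length - 2) = none := by
      apply pvFindJ_none
      intro i hi
      unfold pvAsc
      rw [pvGetD_reps, pvGetD_reps]
      split_ifs <;> first | decide | omega
    rw [hfj]
  · unfold pvStep
    rw [if_neg hL]

lemma binStrings_ne_nil (h d : Nat) : binStrings h d ≠ [] := by
  fun_induction binStrings h d <;> simp_all

lemma binStrings_head (h d : Nat) :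
    (binStrings h d).head? = some (List.replicate h '#' ++ List.replicate d '.') := by
  fun_induction binStrings h d with
  | case1 d => simp
  | case2 h => simp
  | case3 h d ih1 ih2 =>
    rw [List.head?_append_of_ne_nil _ (by simp [binStrings_ne_nil]),
      List.head?_map, ih1]
    simp [List.replicate_succ]

lemma binStrings_last (h d : Nat) :
    (binStrings h d).getLast? = some (List.replicate d '.' ++ List.replicate h '#') := by
  fun_induction binStrings h d with
  | case1 d => simp
  | case2 h => simp
  | case3 h d ih1 ih2 =>
    rw [List.getLast?_append_of_ne_nil _ (by simp [binStrings_ne_nil]),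
      List.getLast?_map, ih2]
    simp [List.replicate_succ]

lemma binStrings_chain (h d : Nat) : List.IsChain pvRel (binStrings h d) := by
  fun_induction binStrings h d with
  | case1 d => exact List.isChain_singleton _
  | case2 h => exact List.isChain_singleton _
  | case3 h d ih1 ih2 =>
    apply List.IsChain.append
    · exact List.isChain_map_of_isChain _ (fun a b hab => pvRel_cons '#' hab) ih1
    · exact List.isChain_map_of_isChain _ (fun a b hab => pvRel_cons '.' hab) ih2
    · intro xx hxx yy hyy
      rw [List.getLast?_map, binStrings_last] at hxx
      rw [List.head?_map, binStrings_head] at hyy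
      simp only [Option.map_some, Option.mem_def, Option.some.injEq] at hxx hyy
      refine ⟨[], d, h, ?_, ?_⟩
      · rw [← hxx]; simp
      · rw [← hyy]; simp

lemma binStrings_len (h d : Nat) : (binStrings h d).length ≤ 2 ^ (h + d) := by
  fun_induction binStrings h d with
  | case1 d => simp [Nat.one_le_two_pow]
  | case2 h => simp [Nat.one_le_two_pow]
  | case3 h d ih1 ih2 =>
    rw [show h + (d + 1) = h + d + 1 by omega] at ih1
    rw [show (h + 1) + d = h + d + 1 by omega] at ih2
    have e1 : h + 1 + (d + 1) = (h + d + 1) + 1 := by omega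
    rw [List.length_append, List.length_map, List.length_map, e1, Nat.pow_succ]
    omega

lemma pvPerms_eq (l : List (List Char)) :
    ∀ (fuel : Nat) (a : List Char), l.head? = some a → List.IsChain pvRel l →
      (∀ z ∈ l.getLast?, pvStep z = none) → l.length ≤ fuel + 1 → pvPerms fuel a = l := by
  induction l with
  | nil => intro fuel a h; simp at h
  | cons a0 t ih =>
    intro fuel a hhead hchain hlast hlen
    obtain rfl : a = a0 := by simpa using hhead.symm
    cases t with
    | nil =>
      have hstep : pvStep a = none := hlast a (by simp)
      cases fuel with
      | zero => simp [pvPerms]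
      | succ fl => simp [pvPerms, hstep]
    | cons b t' =>
      have hR : pvRel a b := (List.isChain_cons_cons.mp hchain).1
      have hstep := pvStep_rel hR
      cases fuel with
      | zero => simp at hlen
      | succ fl =>
        simp only [pvPerms, hstep]
        congr 1
        apply ih fl b rfl (List.isChain_cons_cons.mp hchain).2
        · intro z hz
          exact hlast z (by rw [List.getLast?_cons_cons]; exact hz)
        · simp at hlen ⊢; omega

lemma pvPerms_bin (h d : Nat) :
    pvPerms (2 ^ (h + d)) (List.replicate h '#' ++ List.replicate d '.') = binStrings h d := by
  apply pvPerms_eq _ _ _ (binStrings_head h d) (binStrings_chain h d)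
  · intro z hz
    rw [binStrings_last h d, Option.mem_def, Option.some.injEq] at hz
    rw [← hz]
    exact pvStep_last d h
  · have h1 := binStrings_len h d
    omega

lemma pvSorted_reps (H D : Nat) :
    PySem.List.sorted (List.replicate H '#' ++ List.replicate D '.') (fun c => c) =
      List.replicate H '#' ++ List.replicate D '.' := by
  apply PySem.List.sorted_eq_self_of_pairwise
  apply List.pairwise_append.mpr
  refine ⟨List.pairwise_replicate_of_refl, List.pairwise_replicate_of_refl, ?_⟩
  intro x hx y hy
  rw [List.eq_of_mem_replicate hx, List.eq_of_mem_replicate hy]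
  decide

lemma pvMaxToNat (x : Int) : (max x 0).toNat = x.toNat := by omega

lemma pvLenReps (H D : Nat) :
    (List.replicate H '#' ++ List.replicate D '.').length = H + D := by simp

-- ===== VERDICT (by name: the statement is the Claim_ definition above) =====
theorem create_test_strings_spec : Claim_equal_create_test_strings := by
  intro record backup _dom _pre
  unfold Spec_create_test_strings create_test_strings create_test_strings_alt
  simp only [PySem.List.pyRepeat_singleton, pvMaxToNat, pvSorted_reps]
  rw [pvLenReps, pvPerms_bin]
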